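-- pv_equiv track=rewrite | github.com/Ja-Crispy/website | scripts/build_blog.py | get_categories_for_tags
-- ===== SOURCE A (Python) =====
-- TAG_CATEGORIES = {
--     'core-ml': {
--         'label': 'Core ML/AI',
--         'color': '#e8c547',
--         'tags': ['llm', 'neural-networks', 'transformers', 'interpretability', 'alignment', 'embeddings'],
--     },
--     'systems': {
--         'label': 'Systems',
--         'color': '#7c9a72',
--         'tags': ['agents', 'context-management', 'architecture', 'infrastructure', 'performance', 'inference', 'dev-tools'],
--     },
--     'gpu': {
--         'label': 'GPU',
--         'color': '#c4837a',
--         'tags': ['gpu', 'cuda'],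
--     },
--     'math': {
--         'label': 'Math & Theory',
--         'color': '#a89ae8',
--         'tags': ['optimization', 'probability', 'geometry', 'math', 'computation', 'compilers', 'programming-languages'],
--     },
--     'domains': {
--         'label': 'Domains',
--         'color': '#e89a7c',
--         'tags': ['game-dev', 'graphics', 'physics', 'vision', 'web'],
--     },
--     'security': {
--         'label': 'Security',
--         'color': '#9ac4e8',
--         'tags': ['security', 'cryptography', 'policy-engines'],
--     },
--     'meta': {
--         'label': 'Meta',
--         'color': '#c4a645',
--         'tags': ['research', 'subleq', 'evolution', 'jane-street', 'puzzles', 'combinatorics', 'open-source', 'meta'],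
--     },
-- }
--
-- def get_categories_for_tags(tags):
--     """Return list of category keys, ordered by first matching tag position."""
--     cat_positions = {}
--     for cat_key, cat_data in TAG_CATEGORIES.items():
--         for i, t in enumerate(tags):
--             if t in cat_data['tags']:
--                 if cat_key not in cat_positions or i < cat_positions[cat_key]:
--                     cat_positions[cat_key] = i
--                 break
--     cats = sorted(cat_positions.keys(), key=lambda k: cat_positions[k])
--     return cats if cats else ['meta']
-- ===== SOURCE B (Python) =====
-- TAG_CATEGORIES = {
--     'core-ml': {
--         'label': 'Core ML/AI',
--         'color': '#e8c547',
--         'tags': ['llm', 'neural-networks', 'transformers', 'interpretability', 'alignment', 'embeddings'],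
--     },
--     'systems': {
--         'label': 'Systems',
--         'color': '#7c9a72',
--         'tags': ['agents', 'context-management', 'architecture', 'infrastructure', 'performance', 'inference', 'dev-tools'],
--     },
--     'gpu': {
--         'label': 'GPU',
--         'color': '#c4837a',
--         'tags': ['gpu', 'cuda'],
--     },
--     'math': {
--         'label': 'Math & Theory',
--         'color': '#a89ae8',
--         'tags': ['optimization', 'probability', 'geometry', 'math', 'computation', 'compilers', 'programming-languages'],
--     },
--     'domains': {
--         'label': 'Domains',
--         'color': '#e89a7c',
--         'tags': ['game-dev', 'graphics', 'physics', 'vision', 'web'],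
--     },
--     'security': {
--         'label': 'Security',
--         'color': '#9ac4e8',
--         'tags': ['security', 'cryptography', 'policy-engines'],
--     },
--     'meta': {
--         'label': 'Meta',
--         'color': '#c4a645',
--         'tags': ['research', 'subleq', 'evolution', 'jane-street', 'puzzles', 'combinatorics', 'open-source', 'meta'],
--     },
-- }
--
--
-- def _category_of(tag):
--     """First (only, since tag lists are disjoint) category whose tag list contains tag."""
--     for key, data in TAG_CATEGORIES.items():
--         if tag in data['tags']:
--             return key
--     return None
--
--
-- def get_categories_for_tags(tags):
--     """Return list of category keys, ordered by first matching tag position."""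
--     result = []
--     seen = set()
--     for tag in tags:
--         cat = _category_of(tag)
--         if cat is not None and cat not in seen:
--             seen.add(cat)
--             result.append(cat)
--     return result or ['meta']
-- ===== Notes on version B (the rewrite author's own statement) =====
-- stated objective: simpler
-- what changed: One ordered pass over tags with a seen-set, appending each tag's category at its first occurrence, instead of building a per-category first-position dict and sorting the keys by position (equivalent because the category tag lists are disjoint).
import Mathlib
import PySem

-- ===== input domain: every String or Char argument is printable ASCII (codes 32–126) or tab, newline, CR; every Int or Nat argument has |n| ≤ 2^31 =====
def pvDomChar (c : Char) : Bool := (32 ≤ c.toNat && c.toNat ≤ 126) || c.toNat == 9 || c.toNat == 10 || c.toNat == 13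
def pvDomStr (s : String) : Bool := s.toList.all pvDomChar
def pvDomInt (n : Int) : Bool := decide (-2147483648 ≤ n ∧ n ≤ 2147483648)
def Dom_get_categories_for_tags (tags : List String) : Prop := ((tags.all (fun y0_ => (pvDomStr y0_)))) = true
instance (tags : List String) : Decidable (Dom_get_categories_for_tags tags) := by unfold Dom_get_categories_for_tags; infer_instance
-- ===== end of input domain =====

-- B replaces A's per-category first-position dict + sort by a single ordered pass over tags
-- with a seen-set (objective: simpler); equivalent because the category tag lists are disjoint.

-- ===== PORT A =====
-- TAG_CATEGORIES as an association list key ↦ (label, color, tags); entry tags are p.2.2.2.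
def TAG_CATEGORIES : List (String × String × String × List String) := [
  ("core-ml", "Core ML/AI", "#e8c547", ["llm", "neural-networks", "transformers", "interpretability", "alignment", "embeddings"]),
  ("systems", "Systems", "#7c9a72", ["agents", "context-management", "architecture", "infrastructure", "performance", "inference", "dev-tools"]),
  ("gpu", "GPU", "#c4837a", ["gpu", "cuda"]),
  ("math", "Math & Theory", "#a89ae8", ["optimization", "probability", "geometry", "math", "computation", "compilers", "programming-languages"]),
  ("domains", "Domains", "#e89a7c", ["game-dev", "graphics", "physics", "vision", "web"]),
  ("security", "Security", "#9ac4e8", ["security", "cryptography", "policy-engines"]),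
  ("meta", "Meta", "#c4a645", ["research", "subleq", "evolution", "jane-street", "puzzles", "combinatorics", "open-source", "meta"])]

-- A's inner `for i, t in enumerate(tags): … break`: both branches of the match return (the break).
-- Python's `cat_key not in cat_positions or i < cat_positions[cat_key]`: the subscript is only
-- evaluated when the key is present (short-circuit `or`), so `getD … 0` is exact.
def pvInnerA (catKey : String) (catTags : List String) (d : PySem.Dict String Int) : List (Int × String) → PySem.Dict String Int
  | [] => d
  | (i, t) :: rest =>
    if catTags.contains t then
      if !(d.contains catKey) || decide (i < d.getD catKey 0) then d.insert catKey i else d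
    else pvInnerA catKey catTags d rest

def get_categories_for_tags (tags : List String) : List String :=
  let cat_positions := TAG_CATEGORIES.foldl (fun d p => pvInnerA p.1 p.2.2.2 d (PySem.List.enumerate tags)) PySem.Dict.empty
  let cats := PySem.List.sorted cat_positions.keys (fun k => cat_positions.getD k 0) false
  if cats = [] then ["meta"] else cats

-- ===== PORT B =====
-- Source B's `_category_of`: scan TAG_CATEGORIES, return the first key whose tag list contains tag.
def pvCategoryOfAux : List (String × String × String × List String) → String → Option String
  | [], _ => none
  | p :: rest, tag => if p.2.2.2.contains tag then some p.1 else pvCategoryOfAux rest tag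

def pvCategoryOf (tag : String) : Option String := pvCategoryOfAux TAG_CATEGORIES tag

def get_categories_for_tags_alt (tags : List String) : List String :=
  let rs := tags.foldl (fun (acc : List String × PySem.Set String) tag =>
      match pvCategoryOf tag with
      | some c => if acc.2.contains c then acc else (acc.1 ++ [c], PySem.Set.add acc.2 c)
      | none => acc) ([], PySem.Set.empty)
  if rs.1 = [] then ["meta"] else rs.1

-- ===== PRECONDITION & SPEC =====
def Spec_get_categories_for_tags (tags : List String) (out : List String) : Prop := out = get_categories_for_tags_alt tags
instance (tags : List String) (out : List String) : Decidable (Spec_get_categories_for_tags tags out) := by unfold Spec_get_categories_for_tags; infer_instance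

-- ===== CLAIM (what is proved, stated in full; the proofs are below) =====
def Claim_equal_get_categories_for_tags : Prop := ∀ (tags : List String), Dom_get_categories_for_tags tags → Spec_get_categories_for_tags tags (get_categories_for_tags tags)

-- ===== LEMMAS AND PROOFS =====

-- first index of a tag of `ts` in `tags` (the position A's inner loop breaks at)
def pvPos (ts : List String) : List String → Option Nat
  | [] => none
  | t :: r => if ts.contains t then some 0 else (pvPos ts r).map (· + 1)

-- tag list of the table entry named k ([] if k is not a table key)
def pvKeyTags (k : String) : List String :=
  ((TAG_CATEGORIES.find? (fun p => p.1 == k)).map (fun p => p.2.2.2)).getD []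

def pvPosOf (tags : List String) (k : String) : Option Nat := pvPos (pvKeyTags k) tags

-- reference result: categories in order of first matching tag, skipping `ex`
def pvF : List String → PySem.Set String → List String
  | [], _ => []
  | t :: r, ex =>
    match pvCategoryOf t with
    | some c => if ex.contains c then pvF r ex else c :: pvF r (PySem.Set.add ex c)
    | none => pvF r ex

-- matched table keys, in table order
def pvMatched (tags : List String) : List String :=
  TAG_CATEGORIES.filterMap (fun p => (pvPos p.2.2.2 tags).map (fun _ => p.1))

theorem pvDisj : ∀ p ∈ TAG_CATEGORIES, ∀ q ∈ TAG_CATEGORIES, ∀ t ∈ p.2.2.2, t ∈ q.2.2.2 → p.1 = q.1 := by decide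

theorem pvKeysNodup : (TAG_CATEGORIES.map (·.1)).Nodup := by decide


-- _category_of returns the key of some entry containing t
theorem pvAux_some {tbl : List (String × String × String × List String)} {t c : String}
    (h : pvCategoryOfAux tbl t = some c) : ∃ p ∈ tbl, p.1 = c ∧ t ∈ p.2.2.2 := by
  induction tbl with
  | nil => simp [pvCategoryOfAux] at h
  | cons q rest ih =>
    by_cases hq : q.2.2.2.contains t
    · simp only [pvCategoryOfAux, hq, if_pos] at h
      exact ⟨q, List.mem_cons_self, by simpa using h, by simpa using hq⟩
    · simp only [pvCategoryOfAux, hq] at h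
      obtain ⟨p, hp, h1, h2⟩ := ih (by simpa using h)
      exact ⟨p, List.mem_cons_of_mem _ hp, h1, h2⟩

-- with disjoint tag lists, any entry containing t names _category_of's answer
theorem pvAux_of_mem {tbl : List (String × String × String × List String)}
    (hdisj : ∀ a ∈ tbl, ∀ b ∈ tbl, ∀ t ∈ a.2.2.2, t ∈ b.2.2.2 → a.1 = b.1)
    {p : String × String × String × List String} (hp : p ∈ tbl) {t : String} (ht : t ∈ p.2.2.2) :
    pvCategoryOfAux tbl t = some p.1 := by
  induction tbl with
  | nil => cases hp
  | cons q rest ih =>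
    by_cases hq : q.2.2.2.contains t
    · simp only [pvCategoryOfAux, hq, if_pos]
      have := hdisj p hp q List.mem_cons_self t ht (by simpa using hq)
      simp [this]
    · rcases List.mem_cons.1 hp with rfl | hp'
      · exact absurd (by simpa using ht) (by simpa using hq)
      · simp only [pvCategoryOfAux, hq, Bool.false_eq_true, if_false]
        exact ih (fun a ha b hb => hdisj a (List.mem_cons_of_mem _ ha) b (List.mem_cons_of_mem _ hb)) hp'

theorem pvCatOf_of_mem {p : String × String × String × List String} (hp : p ∈ TAG_CATEGORIES)
    {t : String} (ht : t ∈ p.2.2.2) : pvCategoryOf t = some p.1 :=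
  pvAux_of_mem pvDisj hp ht

-- find? by key on a key-nodup list finds the entry itself
theorem pvFind_of_mem {l : List (String × String × String × List String)}
    (hnd : (l.map (·.1)).Nodup) {p : String × String × String × List String} (hp : p ∈ l) :
    l.find? (fun q => q.1 == p.1) = some p := by
  induction l with
  | nil => cases hp
  | cons q rest ih =>
    rcases List.mem_cons.1 hp with rfl | hp'
    · simp [List.find?]
    · have hne : q.1 ≠ p.1 := by
        intro he
        apply (List.nodup_cons.1 hnd).1
        exact List.mem_map.2 ⟨p, hp', he.symm⟩
      rw [List.find?_cons_of_neg (by simpa using hne)]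
      exact ih (List.nodup_cons.1 hnd).2 hp'

theorem pvKeyTags_of_mem {p : String × String × String × List String} (hp : p ∈ TAG_CATEGORIES) :
    pvKeyTags p.1 = p.2.2.2 := by
  simp [pvKeyTags, pvFind_of_mem pvKeysNodup hp]

theorem pvMem_keyTags_of_catOf {t c : String} (h : pvCategoryOf t = some c) : t ∈ pvKeyTags c := by
  obtain ⟨p, hp, rfl, ht⟩ := pvAux_some h
  rw [pvKeyTags_of_mem hp]; exact ht

theorem pvNotMem_keyTags {t k : String} (h : pvCategoryOf t ≠ some k) : t ∉ pvKeyTags k := by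
  by_cases hk : ∃ p ∈ TAG_CATEGORIES, p.1 = k
  · obtain ⟨p, hp, rfl⟩ := hk
    rw [pvKeyTags_of_mem hp]
    intro ht
    exact h (pvCatOf_of_mem hp ht)
  · have : TAG_CATEGORIES.find? (fun q => q.1 == k) = none := by
      rw [List.find?_eq_none]
      intro p hp
      simpa using fun he => hk ⟨p, hp, he⟩
    simp [pvKeyTags, this]

theorem pvPos_isSome_iff {ts : List String} : ∀ {tags : List String},
    (pvPos ts tags).isSome = true ↔ ∃ t ∈ tags, t ∈ ts := by
  intro tags
  induction tags with
  | nil => simp [pvPos]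
  | cons t r ih =>
    by_cases h : ts.contains t
    · simp [pvPos, List.contains_iff_mem.1 h]
    · have h' : t ∉ ts := fun hm => h (List.contains_iff_mem.2 hm)
      simp [pvPos, h', ih]

theorem pvPosOf_cons_match {t : String} {r : List String} {c : String}
    (h : pvCategoryOf t = some c) : pvPosOf (t :: r) c = some 0 := by
  have := pvMem_keyTags_of_catOf h
  simp [pvPosOf, pvPos, this]

theorem pvPosOf_cons_shift {t : String} {r : List String} {k : String}
    (h : pvCategoryOf t ≠ some k) : pvPosOf (t :: r) k = (pvPosOf r k).map (· + 1) := by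
  have h' : t ∉ pvKeyTags k := pvNotMem_keyTags h
  simp [pvPosOf, pvPos, h']

-- A's inner loop computes the first matching position and breaks
theorem pvInnerA_eq (ck : String) (ts : List String) :
    ∀ (tags : List String) (s : Int) (d : PySem.Dict String Int), d.contains ck = false →
      pvInnerA ck ts d (PySem.List.enumerate tags s) =
        match pvPos ts tags with
        | some n => d.insert ck (s + (n : Int))
        | none => d := by
  intro tags
  induction tags with
  | nil => intro s d hd; simp [PySem.List.enumerate_nil, pvInnerA, pvPos]
  | cons t r ih =>
    intro s d hd
    rw [PySem.List.enumerate_cons]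
    by_cases h : ts.contains t
    · have h0 : pvPos ts (t :: r) = some 0 := by simp [pvPos, List.contains_iff_mem.1 h]
      rw [h0]
      simp [pvInnerA, List.contains_iff_mem.1 h, hd]
    · simp only [pvInnerA, h, Bool.false_eq_true, if_false]
      rw [ih (s + 1) d hd]
      simp only [pvPos, h, Bool.false_eq_true, if_false]
      cases hp : pvPos ts r with
      | none => simp
      | some n => simp; congr 1; ring

-- the dict after A's outer loop, as an items list
theorem pvAfold_items (tags : List String) :
    ∀ (tbl : List (String × String × String × List String)) (d : PySem.Dict String Int),
      d.keys.Nodup → (∀ p ∈ tbl, d.contains p.1 = false) → (tbl.map (·.1)).Nodup →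
      (tbl.foldl (fun d p => pvInnerA p.1 p.2.2.2 d (PySem.List.enumerate tags)) d).items
        = d.items ++ tbl.filterMap (fun p => (pvPos p.2.2.2 tags).map (fun n => (p.1, (n : Int)))) := by
  intro tbl
  induction tbl with
  | nil => intro d _ _ _; simp
  | cons p rest ih =>
    intro d hnd hfresh hknd
    have hd : d.contains p.1 = false := hfresh p List.mem_cons_self
    rw [List.foldl_cons, pvInnerA_eq p.1 p.2.2.2 tags 0 d hd]
    cases hp : pvPos p.2.2.2 tags with
    | none =>
      rw [ih d hnd (fun q hq => hfresh q (List.mem_cons_of_mem _ hq)) (List.nodup_cons.1 hknd).2]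
      simp [hp]
    | some n =>
      have hfresh' : ∀ q ∈ rest, (d.insert p.1 (0 + (n : Int))).contains q.1 = false := by
        intro q hq
        have hne : q.1 ≠ p.1 := by
          intro he
          apply (List.nodup_cons.1 hknd).1
          exact List.mem_map.2 ⟨q, hq, he⟩
        rw [PySem.Dict.contains_insert d p.1 q.1]
        simp [hne, hfresh q (List.mem_cons_of_mem _ hq)]
      rw [ih (d.insert p.1 (0 + (n : Int))) (PySem.Dict.nodup_keys_insert d p.1 (0 + (n : Int)) hnd) hfresh' (List.nodup_cons.1 hknd).2]
      rw [PySem.Dict.items_insert_of_not_contains d (0 + (n : Int)) hd]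
      simp [hp]

-- the dict A builds
def pvD (tags : List String) : PySem.Dict String Int :=
  TAG_CATEGORIES.foldl (fun d p => pvInnerA p.1 p.2.2.2 d (PySem.List.enumerate tags)) PySem.Dict.empty

theorem pvD_items (tags : List String) :
    (pvD tags).items = TAG_CATEGORIES.filterMap (fun p => (pvPos p.2.2.2 tags).map (fun n => (p.1, (n : Int)))) := by
  rw [pvD, pvAfold_items tags TAG_CATEGORIES PySem.Dict.empty (by simp) (by simp) pvKeysNodup]
  rfl

theorem pvD_keys (tags : List String) : (pvD tags).keys = pvMatched tags := by
  show ((pvD tags).items.map (·.1)) = _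
  rw [pvD_items, List.map_filterMap, pvMatched]
  congr 1; funext p
  cases pvPos p.2.2.2 tags <;> simp

theorem pvMatched_sublist (tags : List String) :
    (pvMatched tags).Sublist (TAG_CATEGORIES.map (·.1)) := by
  rw [pvMatched]
  generalize TAG_CATEGORIES = tbl
  induction tbl with
  | nil => simp
  | cons p rest ih =>
    cases h : pvPos p.2.2.2 tags with
    | none => simp only [List.filterMap_cons, List.map_cons, h, Option.map_none]; exact ih.cons _
    | some n => simp only [List.filterMap_cons, List.map_cons, h, Option.map_some]; exact ih.cons₂ _

theorem pvD_keys_nodup (tags : List String) : (pvD tags).keys.Nodup := by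
  rw [pvD_keys]; exact (pvMatched_sublist tags).nodup pvKeysNodup

theorem pvMem_matched {tags : List String} {k : String} :
    k ∈ pvMatched tags ↔ ∃ p ∈ TAG_CATEGORIES, p.1 = k ∧ (pvPos p.2.2.2 tags).isSome = true := by
  simp only [pvMatched, List.mem_filterMap]
  constructor
  · rintro ⟨p, hp, hmap⟩
    cases h : pvPos p.2.2.2 tags with
    | none => rw [h] at hmap; simp at hmap
    | some n => rw [h] at hmap; simp at hmap; exact ⟨p, hp, hmap, by simp [h]⟩
  · rintro ⟨p, hp, rfl, hs⟩
    cases h : pvPos p.2.2.2 tags with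
    | none => rw [h] at hs; simp at hs
    | some n => exact ⟨p, hp, by simp [h]⟩

theorem pvD_getD {tags : List String} {p : String × String × String × List String} {n : Nat}
    (hp : p ∈ TAG_CATEGORIES) (hn : pvPos p.2.2.2 tags = some n) :
    (pvD tags).getD p.1 0 = (n : Int) := by
  have hmem : (p.1, (n : Int)) ∈ (pvD tags).items := by
    rw [pvD_items]
    exact List.mem_filterMap.2 ⟨p, hp, by simp [hn]⟩
  exact PySem.Dict.getD_of_mem_items (pvD tags) hmem (pvD_keys_nodup tags) 0

-- B's fold, unfolded to pvF
theorem pvBfold_eq : ∀ (tags : List String) (acc : List String) (ex : PySem.Set String),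
    (tags.foldl (fun (acc : List String × PySem.Set String) tag =>
        match pvCategoryOf tag with
        | some c => if acc.2.contains c then acc else (acc.1 ++ [c], PySem.Set.add acc.2 c)
        | none => acc) (acc, ex)).1 = acc ++ pvF tags ex := by
  intro tags
  induction tags with
  | nil => intro acc ex; simp [pvF]
  | cons t r ih =>
    intro acc ex
    rw [List.foldl_cons]
    cases h : pvCategoryOf t with
    | none => simp only [h, pvF]; exact ih acc ex
    | some c =>
      by_cases hc : ex.contains c
      · simp only [h, hc, pvF, if_pos]; exact ih acc ex
      · simp only [h, hc, pvF, Bool.false_eq_true, if_false]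
        rw [ih (acc ++ [c]) (PySem.Set.add ex c)]
        simp

theorem pvMem_pvF : ∀ {tags : List String} {ex : PySem.Set String} {k : String},
    k ∈ pvF tags ex ↔ (k ∉ ex ∧ ∃ t ∈ tags, pvCategoryOf t = some k) := by
  intro tags
  induction tags with
  | nil => intro ex k; simp [pvF]
  | cons t r ih =>
    intro ex k
    cases h : pvCategoryOf t with
    | none =>
      simp only [pvF, h, ih, List.mem_cons]
      constructor
      · rintro ⟨hk, t', ht', hc⟩; exact ⟨hk, t', Or.inr ht', hc⟩
      · rintro ⟨hk, t', ht' | ht', hc⟩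
        · subst ht'; rw [h] at hc; cases hc
        · exact ⟨hk, t', ht', hc⟩
    | some c =>
      by_cases hc : ex.contains c
      · have hcx : c ∈ ex := by simpa using hc
        simp only [pvF, h, hc, if_pos, ih, List.mem_cons]
        constructor
        · rintro ⟨hk, t', ht', hct⟩; exact ⟨hk, t', Or.inr ht', hct⟩
        · rintro ⟨hk, t', ht' | ht', hct⟩
          · subst ht'; rw [h] at hct; cases hct; exact absurd hcx hk
          · exact ⟨hk, t', ht', hct⟩
      · have hcx : c ∉ ex := by simpa using hc
        simp only [pvF, h, hc, Bool.false_eq_true, if_false, List.mem_cons, ih,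
          PySem.Set.mem_add]
        constructor
        · rintro (rfl | ⟨hk, t', ht', hct⟩)
          · exact ⟨hcx, t, Or.inl rfl, h⟩
          · exact ⟨fun hm => hk (Or.inl hm), t', Or.inr ht', hct⟩
        · rintro ⟨hk, t', ht' | ht', hct⟩
          · subst ht'; rw [h] at hct; exact Or.inl (Option.some_inj.1 hct).symm
          · by_cases hkc : k = c
            · exact Or.inl hkc
            · exact Or.inr ⟨fun hm => hm.elim hk hkc, t', ht', hct⟩

theorem pvF_nodup : ∀ (tags : List String) (ex : PySem.Set String), (pvF tags ex).Nodup := by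
  intro tags
  induction tags with
  | nil => intro ex; simp [pvF]
  | cons t r ih =>
    intro ex
    cases h : pvCategoryOf t with
    | none => simpa [pvF, h] using ih ex
    | some c =>
      by_cases hc : ex.contains c
      · have hcx : c ∈ ex := by simpa using hc
        simpa [pvF, h, hcx] using ih ex
      · have hcx : c ∉ ex := by simpa using hc
        simp only [pvF, h, hc, Bool.false_eq_true, if_false, List.nodup_cons]
        refine ⟨fun hm => ?_, ih _⟩
        exact (pvMem_pvF.1 hm).1 ((PySem.Set.mem_add _ _ _).2 (Or.inr rfl))

-- every element of pvF is a matched table key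
theorem pvF_table {tags : List String} {ex : PySem.Set String} {k : String} (hm : k ∈ pvF tags ex) :
    ∃ p ∈ TAG_CATEGORIES, p.1 = k ∧ (pvPos p.2.2.2 tags).isSome = true := by
  obtain ⟨-, t, ht, hc⟩ := pvMem_pvF.1 hm
  obtain ⟨p, hp, rfl, htp⟩ := pvAux_some hc
  exact ⟨p, hp, rfl, pvPos_isSome_iff.2 ⟨t, ht, htp⟩⟩

theorem pvF_mem_iff_matched {tags : List String} {k : String} :
    k ∈ pvF tags PySem.Set.empty ↔ k ∈ pvMatched tags := by
  rw [pvMem_matched]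
  constructor
  · exact fun h => pvF_table h
  · rintro ⟨p, hp, rfl, hs⟩
    obtain ⟨t, ht, htp⟩ := pvPos_isSome_iff.1 hs
    exact pvMem_pvF.2 ⟨by simp [PySem.Set.empty], t, ht, pvCatOf_of_mem hp htp⟩

theorem pvF_perm_keys (tags : List String) :
    (pvF tags PySem.Set.empty).Perm (pvD tags).keys := by
  rw [pvD_keys]
  apply List.perm_of_nodup_nodup_toFinset_eq (pvF_nodup tags _) ((pvMatched_sublist tags).nodup pvKeysNodup)
  ext k
  simp only [List.mem_toFinset]
  exact pvF_mem_iff_matched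

-- first-match positions strictly increase along pvF
theorem pvF_pairwise : ∀ (tags : List String) (ex : PySem.Set String),
    (pvF tags ex).Pairwise (fun a b => ∀ i j, pvPosOf tags a = some i → pvPosOf tags b = some j → i < j) := by
  intro tags
  induction tags with
  | nil => intro ex; simp [pvF]
  | cons t r ih =>
    intro ex
    have shift : ∀ {k : String}, pvCategoryOf t ≠ some k →
        ∀ {i : Nat}, pvPosOf (t :: r) k = some i → ∃ i', pvPosOf r k = some i' ∧ i = i' + 1 := by
      intro k hk i hi
      rw [pvPosOf_cons_shift hk] at hi
      rcases Option.map_eq_some_iff.1 hi with ⟨i', h1, h2⟩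
      exact ⟨i', h1, h2.symm⟩
    have transfer : ∀ (ex' : PySem.Set String),
        (∀ k ∈ pvF r ex', pvCategoryOf t ≠ some k) →
        (pvF r ex').Pairwise (fun a b => ∀ i j, pvPosOf (t :: r) a = some i → pvPosOf (t :: r) b = some j → i < j) := by
      intro ex' hnc
      refine List.Pairwise.imp_of_mem ?_ (ih ex')
      intro a b ha hb hab i j hi hj
      obtain ⟨i', hi', rfl⟩ := shift (hnc a ha) hi
      obtain ⟨j', hj', rfl⟩ := shift (hnc b hb) hj
      exact Nat.succ_lt_succ (hab i' j' hi' hj')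
    cases h : pvCategoryOf t with
    | none =>
      simp only [pvF, h]
      exact transfer ex (fun k _ hk => by rw [h] at hk; cases hk)
    | some c =>
      by_cases hc : ex.contains c
      · have hcx : c ∈ ex := by simpa using hc
        simp only [pvF, h, hc, if_pos]
        refine transfer ex (fun k hk he => ?_)
        rw [h] at he
        exact (pvMem_pvF.1 hk).1 ((Option.some_inj.1 he) ▸ hcx)
      · simp only [pvF, h, hc, Bool.false_eq_true, if_false]
        have hne : ∀ k ∈ pvF r (PySem.Set.add ex c), pvCategoryOf t ≠ some k := by
          intro k hk he
          rw [h] at he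
          exact (pvMem_pvF.1 hk).1 ((Option.some_inj.1 he) ▸ (PySem.Set.mem_add _ _ _).2 (Or.inr rfl))
        refine List.Pairwise.cons ?_ (transfer (PySem.Set.add ex c) hne)
        intro b hb i j hi hj
        rw [pvPosOf_cons_match h] at hi
        obtain rfl : (0 : Nat) = i := Option.some_inj.1 hi
        obtain ⟨j', hj', rfl⟩ := shift (hne b hb) hj
        omega

-- sorted(cat_positions.keys(), key=…) is exactly pvF
theorem pvSorted_eq (tags : List String) :
    PySem.List.sorted (pvD tags).keys (fun k => (pvD tags).getD k 0) false = pvF tags PySem.Set.empty := by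
  apply PySem.List.sorted_eq_of_perm_of_pairwise_lt _ _ _ (pvF_perm_keys tags)
  refine List.Pairwise.imp_of_mem ?_ (pvF_pairwise tags PySem.Set.empty)
  intro a b ha hb hab
  obtain ⟨p, hp, rfl, hsa⟩ := pvF_table ha
  obtain ⟨q, hq, rfl, hsb⟩ := pvF_table hb
  obtain ⟨i, hi⟩ := Option.isSome_iff_exists.1 hsa
  obtain ⟨j, hj⟩ := Option.isSome_iff_exists.1 hsb
  have hia : pvPosOf tags p.1 = some i := by rw [pvPosOf, pvKeyTags_of_mem hp]; exact hi
  have hjb : pvPosOf tags q.1 = some j := by rw [pvPosOf, pvKeyTags_of_mem hq]; exact hj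
  rw [pvD_getD hp hi, pvD_getD hq hj]
  exact_mod_cast hab i j hia hjb

theorem pvMain (tags : List String) : get_categories_for_tags tags = get_categories_for_tags_alt tags := by
  have h1 := pvSorted_eq tags
  simp only [pvD] at h1
  have h2 := pvBfold_eq tags [] PySem.Set.empty
  simp only [List.nil_append] at h2
  simp only [get_categories_for_tags, get_categories_for_tags_alt]
  rw [h1, h2]

theorem get_categories_for_tags_spec : Claim_equal_get_categories_for_tags := by
  intro tags _
  unfold Spec_get_categories_for_tags
  exact pvMain tags
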